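-- pv_equiv track=rewrite | github.com/UttU28/Saral-Job-Viewer | dValidate.py | errorsIndicateMaasExistingOrDuplicate
-- ===== SOURCE A (Python) =====
-- def _flattenDrfErrors(errs: object) -> list[str]:
--     if not isinstance(errs, dict):
--         return []
--     out: list[str] = []
--     for v in errs.values():
--         if isinstance(v, list):
--             for item in v:
--                 if item is not None:
--                     t = str(item).strip()
--                     if t:
--                         out.append(t)
--         else:
--             if v is not None:
--                 t = str(v).strip()
--                 if t:
--                     out.append(t)
--     return out
--
-- def errorsIndicateMaasExistingOrDuplicate(errs: object) -> bool:
--     """MAAS /check/ validation: job or suggestion already exists."""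
--     needles = (
--         "already exists in maas",
--         "job already exists for this company and title",
--         "duplicate suggestion detected",
--         "this job url was already suggested",
--         "this job url already exists",
--     )
--     for msg in _flattenDrfErrors(errs):
--         low = msg.lower()
--         if any(n in low for n in needles):
--             return True
--     return False
-- ===== SOURCE B (Python) =====
-- def _flattenDrfErrors(errs: object) -> list[str]:
--     if not isinstance(errs, dict):
--         return []
--     out: list[str] = []
--     for v in errs.values():
--         if isinstance(v, list):
--             for item in v:
--                 if item is not None:
--                     t = str(item).strip()
--                     if t:
--                         out.append(t)
--         else:
--             if v is not None:
--                 t = str(v).strip()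
--                 if t:
--                     out.append(t)
--     return out
--
-- def errorsIndicateMaasExistingOrDuplicate(errs: object) -> bool:
--     """MAAS /check/ validation: job or suggestion already exists."""
--     needles = (
--         "already exists in maas",
--         "job already exists for this company and title",
--         "duplicate suggestion detected",
--         "this job url was already suggested",
--         "this job url already exists",
--     )
--     blob = "\n".join(m.lower() for m in _flattenDrfErrors(errs))
--     for n in needles:
--         if n in blob:
--             return True
--     return False
-- ===== Notes on version B (the rewrite author's own statement) =====
-- stated objective: alternative
-- what changed: Instead of lowering each flattened message and scanning it for every needle inside a per-message loop, B joins all lowered messages into one newline-separated blob and runs a single flat loop over the needles against that blob (loop nesting inverted, one maintained string; newline separator prevents cross-boundary matches since no needle contains a newline).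
import Mathlib
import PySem

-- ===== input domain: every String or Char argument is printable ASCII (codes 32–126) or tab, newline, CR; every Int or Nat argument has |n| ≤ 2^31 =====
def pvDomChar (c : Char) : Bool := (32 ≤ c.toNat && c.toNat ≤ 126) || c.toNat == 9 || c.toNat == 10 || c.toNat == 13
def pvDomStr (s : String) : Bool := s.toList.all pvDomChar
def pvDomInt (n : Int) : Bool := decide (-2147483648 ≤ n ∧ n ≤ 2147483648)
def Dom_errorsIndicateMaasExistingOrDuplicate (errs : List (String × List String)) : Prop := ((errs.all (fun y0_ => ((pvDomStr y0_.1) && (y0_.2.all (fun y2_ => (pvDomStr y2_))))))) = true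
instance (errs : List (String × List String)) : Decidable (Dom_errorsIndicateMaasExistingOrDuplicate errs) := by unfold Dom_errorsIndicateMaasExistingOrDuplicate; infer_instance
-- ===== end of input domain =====

-- B joins the lowered flattened messages with '\n' into one blob and scans it once per needle
-- (loop nesting inverted); same result, no speed claim. A mutates nothing; return-value equivalence.

-- the needles tuple (shared literal of both Pythons)
def pvNeedles : List String :=
  ["already exists in maas",
   "job already exists for this company and title",
   "duplicate suggestion detected",
   "this job url was already suggested",
   "this job url already exists"]

-- _flattenDrfErrors (shared helper of both Pythons): errs is a dict, every value a list of
-- strings (the declared type), so the isinstance branches collapse to the dict/list path and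
-- 'item is not None' / 'str(item)' are identities.
def pvFlattenDrfErrors (errs : List (String × List String)) : List String :=
  errs.foldl (fun out p =>
    p.2.foldl (fun out item =>
      let t := PySem.Str.strip item
      if t ≠ "" then out ++ [t] else out) out) []

-- ===== PORT A =====
-- for msg in flatten: low = msg.lower(); if any(n in low for n in needles): return True
def pvALoop : List String → Bool
  | [] => false
  | m :: rest =>
    let low := PySem.Str.lower m
    if pvNeedles.any (fun n => PySem.Str.isIn n low) then true else pvALoop rest

def errorsIndicateMaasExistingOrDuplicate (errs : List (String × List String)) : Bool :=
  pvALoop (pvFlattenDrfErrors errs)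

-- ===== PORT B =====
-- blob = "\n".join(m.lower() for m in flatten); for n in needles: if n in blob: return True
def pvBLoop (blob : String) : List String → Bool
  | [] => false
  | n :: rest => if PySem.Str.isIn n blob then true else pvBLoop blob rest

def errorsIndicateMaasExistingOrDuplicate_alt (errs : List (String × List String)) : Bool :=
  let blob := PySem.Str.join "\n" ((pvFlattenDrfErrors errs).map PySem.Str.lower)
  pvBLoop blob pvNeedles

-- ===== PRECONDITION & SPEC =====
def Spec_errorsIndicateMaasExistingOrDuplicate (errs : List (String × List String)) (out : Bool) : Prop := out = errorsIndicateMaasExistingOrDuplicate_alt errs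
instance (errs : List (String × List String)) (out : Bool) : Decidable (Spec_errorsIndicateMaasExistingOrDuplicate errs out) := by unfold Spec_errorsIndicateMaasExistingOrDuplicate; infer_instance

-- ===== CLAIM (what is proved, stated in full; the proofs are below) =====
def Claim_equal_errorsIndicateMaasExistingOrDuplicate : Prop := ∀ (errs : List (String × List String)), Dom_errorsIndicateMaasExistingOrDuplicate errs → Spec_errorsIndicateMaasExistingOrDuplicate errs (errorsIndicateMaasExistingOrDuplicate errs)

-- ===== LEMMAS AND PROOFS =====

-- a '\n'-free prefix of a ++ '\n' :: b is a prefix of a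
theorem pv_prefix_through {c : Char} : ∀ (n a b : List Char), c ∉ n → n <+: a ++ c :: b → n <+: a
  | [], _, _, _, _ => List.nil_prefix
  | x :: n', a, b, hc, hp => by
    cases a with
    | nil =>
      rcases (List.cons_prefix_cons.mp hp) with ⟨hx, _⟩
      exact absurd (hx ▸ List.mem_cons_self) hc
    | cons y a' =>
      rcases (List.cons_prefix_cons.mp hp) with ⟨hx, hp'⟩
      have := pv_prefix_through n' a' b (fun h => hc (List.mem_cons_of_mem _ h)) hp'
      exact List.cons_prefix_cons.mpr ⟨hx, this⟩

-- a nonempty '\n'-free infix of a ++ '\n' :: b sits entirely in a or in b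
theorem pv_infix_append_cons {c : Char} (n : List Char) (hne : n ≠ []) (hc : c ∉ n) :
    ∀ (a b : List Char), (n <:+: a ++ c :: b ↔ n <:+: a ∨ n <:+: b) := by
  intro a
  induction a with
  | nil =>
    intro b
    constructor
    · intro h
      rcases List.infix_cons_iff.mp h with hp | hi
      · cases n with
        | nil => exact absurd rfl hne
        | cons x n' =>
          rcases List.cons_prefix_cons.mp hp with ⟨hx, _⟩
          exact absurd (hx ▸ List.mem_cons_self) hc
      · exact Or.inr hi
    · rintro (h | h)
      · exact absurd (List.sublist_nil.mp h.sublist) hne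
      · exact List.infix_cons_iff.mpr (Or.inr h)
  | cons y a' ih =>
    intro b
    constructor
    · intro h
      rcases List.infix_cons_iff.mp h with hp | hi
      · exact Or.inl ((pv_prefix_through n (y :: a') b hc hp).isInfix)
      · rcases (ih b).mp hi with h1 | h2
        · exact Or.inl (List.infix_cons_iff.mpr (Or.inr h1))
        · exact Or.inr h2
    · rintro (h | h)
      · exact h.trans (List.prefix_append (y :: a') (c :: b)).isInfix
      · exact h.trans ((List.suffix_cons c b).trans (List.suffix_append (y :: a') (c :: b))).isInfix

-- a nonempty '\n'-free needle is in the '\n'-join iff it is in some part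
theorem pv_infix_join {c : Char} (n : List Char) (hne : n ≠ []) (hc : c ∉ n) :
    ∀ (ls : List (List Char)), (n <:+: PySem.Chars.join [c] ls ↔ ∃ l ∈ ls, n <:+: l) := by
  intro ls
  induction ls with
  | nil =>
    rw [PySem.Chars.join_nil]
    constructor
    · intro h; exact absurd (List.sublist_nil.mp h.sublist) hne
    · rintro ⟨l, h, _⟩; simp at h
  | cons l ls ih =>
    cases ls with
    | nil => simp [PySem.Chars.join_singleton]
    | cons l' rest =>
      rw [PySem.Chars.join_cons_cons]
      have : l ++ [c] ++ PySem.Chars.join [c] (l' :: rest)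
           = l ++ c :: PySem.Chars.join [c] (l' :: rest) := by simp
      rw [this, pv_infix_append_cons n hne hc, ih]
      simp only [List.mem_cons]
      constructor
      · rintro (h | ⟨x, hx, h⟩)
        · exact ⟨l, Or.inl rfl, h⟩
        · exact ⟨x, Or.inr hx, h⟩
      · rintro ⟨x, hx | hx, h⟩
        · exact Or.inl (hx ▸ h)
        · exact Or.inr ⟨x, hx, h⟩

theorem pvALoop_eq_any (msgs : List String) :
    pvALoop msgs = msgs.any (fun m => pvNeedles.any (fun n => PySem.Str.isIn n (PySem.Str.lower m))) := by
  induction msgs with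
  | nil => rfl
  | cons m rest ih =>
    simp only [pvALoop, List.any_cons, ih]
    cases h : pvNeedles.any (fun n => PySem.Str.isIn n (PySem.Str.lower m)) <;> simp

theorem pvBLoop_eq_any (blob : String) : ∀ (ns : List String),
    pvBLoop blob ns = ns.any (fun n => PySem.Str.isIn n blob) := by
  intro ns
  induction ns with
  | nil => rfl
  | cons n rest ih =>
    simp only [pvBLoop, List.any_cons, ih]
    cases h : PySem.Str.isIn n blob <;> simp

theorem pvNeedles_ok : ∀ n ∈ pvNeedles, n.toList ≠ [] ∧ '\n' ∉ n.toList := by decide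

theorem pvMain (msgs : List String) :
    pvALoop msgs = pvBLoop (PySem.Str.join "\n" (msgs.map PySem.Str.lower)) pvNeedles := by
  rw [pvALoop_eq_any, pvBLoop_eq_any, Bool.eq_iff_iff]
  simp only [List.any_eq_true, PySem.Str.isIn_iff_infix, PySem.Str.toList_join,
    List.map_map, Function.comp_def, PySem.Str.toList_lower]
  have hsep : ("\n" : String).toList = ['\n'] := rfl
  rw [hsep]
  constructor
  · rintro ⟨m, hm, n, hn, h⟩
    refine ⟨n, hn, ?_⟩
    rw [pv_infix_join n.toList (pvNeedles_ok n hn).1 (pvNeedles_ok n hn).2]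
    exact ⟨PySem.Chars.lower m.toList, List.mem_map.mpr ⟨m, hm, rfl⟩, h⟩
  · rintro ⟨n, hn, h⟩
    rw [pv_infix_join n.toList (pvNeedles_ok n hn).1 (pvNeedles_ok n hn).2] at h
    rcases h with ⟨l, hl, h⟩
    rcases List.mem_map.mp hl with ⟨m, hm, rfl⟩
    exact ⟨m, hm, n, hn, h⟩

-- ===== VERDICT (by name: the statement is the Claim_ definition above) =====
theorem errorsIndicateMaasExistingOrDuplicate_spec : Claim_equal_errorsIndicateMaasExistingOrDuplicate := by
  intro errs _
  show errorsIndicateMaasExistingOrDuplicate errs = errorsIndicateMaasExistingOrDuplicate_alt errs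
  unfold errorsIndicateMaasExistingOrDuplicate errorsIndicateMaasExistingOrDuplicate_alt
  exact pvMain (pvFlattenDrfErrors errs)
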